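-- pv_equiv track=rewrite | github.com/joshmaglione/MagmaDocumentation | buildMagmaDoc.py | delete_code_example
-- ===== SOURCE A (Python) =====
-- def delete_code_example(lines):
--     i = 0
--     while i < len(lines):
--         while i < len(lines) and not "\\endcodex" in lines[i]:
--             i += 1
--         j = i - 1
--         while j > 0 and lines[j].replace(" ", "").replace("\n", "") == "":
--             j -= 1
--         if "\\endcode" in lines[j]:
--             lines[j] = ""
--         i += 1
--     return lines
-- ===== SOURCE B (Python) =====
-- def delete_code_example(lines):
--     # Blank out the nearest preceding non-blank line of each "\endcodex" marker
--     # when that line contains "\endcode".  One forward pass that tracks the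
--     # index of the most recently seen non-blank line; mutates lines in place.
--     last_nonblank = None
--     for i, line in enumerate(lines):
--         if "\\endcodex" in line:
--             if last_nonblank is not None and "\\endcode" in lines[last_nonblank]:
--                 lines[last_nonblank] = ""
--         if line.replace(" ", "").replace("\n", "") != "":
--             last_nonblank = i
--     return lines
-- ===== Notes on version B (the rewrite author's own statement) =====
-- stated objective: simpler
-- what changed: Replaces the marker-scan with its inner backward blank-skipping loop (and its fall-through erase after a failed scan) by a single forward pass that tracks the index of the most recently seen non-blank line.
-- intended difference: When the scan runs off the end with the last non-blank line containing \endcode (and no \endcodex in the last line), or when the first line contains \endcodex and the last contains \endcode, A's fall-through/negative-index erase blanks a line that precedes no marker; B leaves it, which matches the function's purpose of blanking only \endcode lines before \endcodex markers. — e.g. on delete_code_example(["\\endcode"]): A returns [""], B returns ["\\endcode"]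
import Mathlib
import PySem

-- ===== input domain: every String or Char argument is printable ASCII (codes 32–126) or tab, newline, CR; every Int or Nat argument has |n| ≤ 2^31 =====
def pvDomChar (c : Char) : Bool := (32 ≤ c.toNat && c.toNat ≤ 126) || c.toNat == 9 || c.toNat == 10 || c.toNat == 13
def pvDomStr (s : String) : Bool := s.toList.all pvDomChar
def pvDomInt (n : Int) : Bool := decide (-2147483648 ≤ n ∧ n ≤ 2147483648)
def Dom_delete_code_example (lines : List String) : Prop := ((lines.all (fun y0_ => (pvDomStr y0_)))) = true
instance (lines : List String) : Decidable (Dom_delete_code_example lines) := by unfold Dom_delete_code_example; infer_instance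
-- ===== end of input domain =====

-- B blanks the nearest preceding non-blank line of each \endcodex marker in one forward
-- pass (objective: simpler); A additionally performs accidental erases (stated in D_ below).
-- Both Pythons mutate `lines` in place; the equivalence proved here is about the return value.

-- blank-line test both Pythons use verbatim: s.replace(" ", "").replace("\n", "") == ""
def lineBlank (s : String) : Bool :=
  (PySem.Str.replace (PySem.Str.replace s " " "") "\n" "") == ""

-- ===== PORT A =====
-- inner skip loop: while i < len(lines) and not "\endcodex" in lines[i]: i += 1
def aSkip (lines : List String) (i : Nat) : Nat :=
  if _h : i < lines.length ∧ PySem.Str.isIn "\\endcodex" (PySem.List.pyGetD lines (i : Int) "") = false then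
    aSkip lines (i + 1)
  else i
termination_by lines.length - i
decreasing_by have := _h.1; omega

theorem aSkip_ge (lines : List String) (i : Nat) : i ≤ aSkip lines i := by
  fun_induction aSkip <;> omega

-- backtracking loop: while j > 0 and lines[j] is blank: j -= 1
def aBack (lines : List String) (j : Int) : Int :=
  if _h : 0 < j ∧ lineBlank (PySem.List.pyGetD lines j "") = true then
    aBack lines (j - 1)
  else j
termination_by j.toNat
decreasing_by have := _h.1; omega

-- outer while loop over i
def aOuter (lines : List String) (i : Nat) : List String :=
  if _h : i < lines.length then
    let k := aSkip lines i
    let j := aBack lines ((k : Int) - 1)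
    aOuter
      (if PySem.Str.isIn "\\endcode" (PySem.List.pyGetD lines j "") then PySem.List.pySetD lines j "" else lines)
      (k + 1)
  else lines
termination_by lines.length - i
decreasing_by
  have h1 := aSkip_ge lines i
  split
  · simp only [PySem.List.length_pySetD]; omega
  · omega

def delete_code_example (lines : List String) : List String := aOuter lines 0

-- ===== PORT B =====
-- body of `if "\endcodex" in line:` in Source B: blank lines[last_nonblank] if it has \endcode
def bErase (lines : List String) (lnb : Option Nat) : List String :=
  match lnb with
  | some p =>
    if PySem.Str.isIn "\\endcode" (PySem.List.pyGetD lines (p : Int) "") then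
      PySem.List.pySetD lines (p : Int) ""
    else lines
  | none => lines

theorem bErase_length (lines : List String) (lnb : Option Nat) :
    (bErase lines lnb).length = lines.length := by
  cases lnb with
  | none => rfl
  | some p =>
    simp only [bErase]
    split <;> simp [PySem.List.length_pySetD]

-- the single forward pass of Source B, carrying last_nonblank : Option Nat
def bGo (lines : List String) (i : Nat) (lnb : Option Nat) : List String :=
  if _h : i < lines.length then
    let line := PySem.List.pyGetD lines (i : Int) ""
    let lines' := if PySem.Str.isIn "\\endcodex" line then bErase lines lnb else lines
    bGo lines' (i + 1) (if lineBlank line = false then some i else lnb)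
  else lines
termination_by lines.length - i
decreasing_by
  split
  · simp only [bErase_length]; omega
  · omega

def delete_code_example_alt (lines : List String) : List String := bGo lines 0 none

-- ===== PRECONDITION & SPEC =====
-- A performs two accidental erases that precede no \endcodex marker: the loop body's
-- erase still runs after the scan fails (blanking a trailing non-blank \endcode line),
-- and a marker on the first line checks lines[-1] by negative indexing; B does neither,
-- blanking only \endcode lines that precede a marker, which is the function's purpose.
def D_delete_code_example (lines : List String) : Prop :=
  lines ≠ [] ∧
  ((PySem.Str.isIn "\\endcodex" (lines.getD 0 "") = true ∧
    PySem.Str.isIn "\\endcode" (lines.getLastD "") = true) ∨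
   (PySem.Str.isIn "\\endcodex" (lines.getLastD "") = false ∧
    PySem.Str.isIn "\\endcode" ((lines.reverse.dropWhile (fun s => lineBlank s)).headD "") = true))
instance (lines : List String) : Decidable (D_delete_code_example lines) := by
  unfold D_delete_code_example; infer_instance

def Spec_delete_code_example (lines : List String) (out : List String) : Prop :=
  ¬ D_delete_code_example lines → out = delete_code_example_alt lines
instance (lines : List String) (out : List String) : Decidable (Spec_delete_code_example lines out) := by
  unfold Spec_delete_code_example; infer_instance

def pvDiffWitness_delete_code_example : List String := ["\\endcode"]
def pvDiffWitnessOut_delete_code_example : (List String) × (List String) := ([""], ["\\endcode"])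

-- ===== CLAIM (what is proved, stated in full; the proofs are below) =====
def Claim_unchanged_delete_code_example : Prop := ∀ (lines : List String), Dom_delete_code_example lines → Spec_delete_code_example lines (delete_code_example lines)
def Claim_changed_delete_code_example : Prop := Dom_delete_code_example (pvDiffWitness_delete_code_example) ∧ D_delete_code_example (pvDiffWitness_delete_code_example) ∧ delete_code_example (pvDiffWitness_delete_code_example) = pvDiffWitnessOut_delete_code_example.1 ∧ delete_code_example_alt (pvDiffWitness_delete_code_example) = pvDiffWitnessOut_delete_code_example.2 ∧ pvDiffWitnessOut_delete_code_example.1 ≠ pvDiffWitnessOut_delete_code_example.2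

-- ===== LEMMAS AND PROOFS =====

-- loop invariant of B: lnb is the greatest non-blank index < i (or none)
def INVd (lines : List String) (i : Nat) (lnb : Option Nat) : Prop :=
  (lnb = none ∧ ∀ k, k < i → lineBlank (lines.getD k "") = true) ∨
  (∃ m : Nat, lnb = some m ∧ m < i ∧ lineBlank (lines.getD m "") = false ∧
    ∀ k, m < k → k < i → lineBlank (lines.getD k "") = true)

-- A performs no accidental erase on `cur`: its last non-blank line (all-after blank)
-- either carries an \endcodex on the final line, or has no \endcode
def SweepOK (cur : List String) : Prop :=
  ∀ p, p < cur.length → lineBlank (cur.getD p "") = false →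
    (∀ k, p < k → k < cur.length → lineBlank (cur.getD k "") = true) →
    PySem.Str.isIn "\\endcodex" (cur.getD (cur.length - 1) "") = true ∨
    PySem.Str.isIn "\\endcode" (cur.getD p "") = false

theorem replace_go_single (c : Char) : ∀ (fuel : Nat) (l acc : List Char), l.length ≤ fuel →
    PySem.Chars.replace.go [c] [] fuel l acc = acc.reverse ++ l.filter (fun x => x ≠ c) := by
  intro fuel
  induction fuel with
  | zero =>
    intro l acc h
    have : l = [] := by cases l <;> simp_all
    subst this
    rw [PySem.Chars.replace.go]
    simp
  | succ fuel ih =>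
    intro l acc h
    cases l with
    | nil =>
      rw [PySem.Chars.replace.go]
      simp
      omega
    | cons c' t =>
      rw [PySem.Chars.replace.go]
      by_cases hc : c = c'
      · subst hc
        have hp : List.isPrefixOf [c] (c :: t) = true := by simp [List.isPrefixOf]
        simp only [hp, if_true]
        rw [ih _ _ (by simpa using Nat.le_of_succ_le_succ h)]
        simp
      · have hc' : c' ≠ c := fun hx => hc hx.symm
        rw [if_neg (by simp [List.isPrefixOf]; exact hc)]
        rw [ih _ _ (by simpa using Nat.le_of_succ_le_succ h)]
        simp [hc']

theorem replace_single (c : Char) (s : List Char) :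
    PySem.Chars.replace s [c] [] = s.filter (fun x => x ≠ c) := by
  rw [PySem.Chars.replace]
  simp [replace_go_single c s.length s [] le_rfl]

theorem blank_chars {s : String} (h : lineBlank s = true) :
    ∀ c ∈ s.toList, c = ' ' ∨ c = '\n' := by
  unfold lineBlank at h
  have h2 : (PySem.Str.replace (PySem.Str.replace s " " "") "\n" "") = "" := eq_of_beq h
  have h3 := congrArg String.toList h2
  rw [PySem.Str.toList_replace, PySem.Str.toList_replace] at h3
  rw [show (" " : String).toList = [' '] from rfl, show ("\n" : String).toList = ['\n'] from rfl,
      show ("" : String).toList = [] from rfl] at h3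
  rw [replace_single, replace_single] at h3
  intro c hc
  by_contra hcon
  push_neg at hcon
  have hmem : c ∈ List.filter (fun x => decide (x ≠ '\n')) (List.filter (fun x => decide (x ≠ ' ')) s.toList) := by
    simp [hc, hcon.1, hcon.2]
  rw [h3] at hmem
  cases hmem

theorem blank_no_marker {s : String} (h : lineBlank s = true) :
    PySem.Str.isIn "\\endcodex" s = false := by
  by_contra hcon
  have hin : PySem.Str.isIn "\\endcodex" s = true := by
    cases hx : PySem.Str.isIn "\\endcodex" s <;> simp_all
  rw [PySem.Str.isIn_iff_infix] at hin
  have hmem : '\\' ∈ s.toList := hin.subset (by decide)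
  have := blank_chars h '\\' hmem
  simp at this

theorem blank_no_endcode {s : String} (h : lineBlank s = true) :
    PySem.Str.isIn "\\endcode" s = false := by
  by_contra hcon
  have hin : PySem.Str.isIn "\\endcode" s = true := by
    cases hx : PySem.Str.isIn "\\endcode" s <;> simp_all
  rw [PySem.Str.isIn_iff_infix] at hin
  have hmem : '\\' ∈ s.toList := hin.subset (by decide)
  have := blank_chars h '\\' hmem
  simp at this

theorem marker_not_blank {s : String} (h : PySem.Str.isIn "\\endcodex" s = true) :
    lineBlank s = false := by
  cases hb : lineBlank s
  · rfl
  · rw [blank_no_marker hb] at h; cases h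

-- unfolding lemmas for the loops
theorem aSkip_marker {lines : List String} {i : Nat}
    (h : PySem.Str.isIn "\\endcodex" (PySem.List.pyGetD lines (i : Int) "") = true) :
    aSkip lines i = i := by
  rw [aSkip, dif_neg]
  simp only [not_and]
  intro _
  simp at h
  simp [h]

theorem aSkip_len {lines : List String} {i : Nat} (h : ¬ i < lines.length) :
    aSkip lines i = i := by
  rw [aSkip, dif_neg]
  exact fun hc => absurd hc.1 h

theorem aSkip_step {lines : List String} {i : Nat} (h1 : i < lines.length)
    (h2 : PySem.Str.isIn "\\endcodex" (PySem.List.pyGetD lines (i : Int) "") = false) :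
    aSkip lines i = aSkip lines (i + 1) := by
  rw [aSkip, dif_pos ⟨h1, h2⟩]

theorem aOuter_end {lines : List String} {i : Nat} (h : ¬ i < lines.length) :
    aOuter lines i = lines := by
  rw [aOuter, dif_neg h]

theorem aOuter_step {lines : List String} {i : Nat} (h : i < lines.length) :
    aOuter lines i =
      aOuter
        (if PySem.Str.isIn "\\endcode" (PySem.List.pyGetD lines (aBack lines ((aSkip lines i : Int) - 1)) "") then
          PySem.List.pySetD lines (aBack lines ((aSkip lines i : Int) - 1)) "" else lines)
        (aSkip lines i + 1) := by
  rw [aOuter, dif_pos h]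

theorem bGo_end {lines : List String} {i : Nat} {lnb : Option Nat} (h : ¬ i < lines.length) :
    bGo lines i lnb = lines := by
  rw [bGo, dif_neg h]

theorem bGo_step {lines : List String} {i : Nat} {lnb : Option Nat} (h : i < lines.length) :
    bGo lines i lnb =
      bGo (if PySem.Str.isIn "\\endcodex" (PySem.List.pyGetD lines (i : Int) "") then bErase lines lnb else lines)
        (i + 1)
        (if lineBlank (PySem.List.pyGetD lines (i : Int) "") = false then some i else lnb) := by
  rw [bGo, dif_pos h]

-- the invariant survives one step that does not modify the list
theorem INV_step {lines : List String} {i : Nat} {lnb : Option Nat} (hinv : INVd lines i lnb) :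
    INVd lines (i + 1) (if lineBlank (lines.getD i "") = false then some i else lnb) := by
  by_cases hb : lineBlank (lines.getD i "") = false
  · rw [if_pos hb]
    exact Or.inr ⟨i, rfl, by omega, hb, fun k h1 h2 => by omega⟩
  · rw [if_neg hb]
    have hbt : lineBlank (lines.getD i "") = true := by
      cases hx : lineBlank (lines.getD i "") <;> simp_all
    rcases hinv with ⟨h1, hall⟩ | ⟨m, hm, hmlt, hnb, hblank⟩
    · refine Or.inl ⟨h1, fun k hk => ?_⟩
      rcases Nat.lt_succ_iff_lt_or_eq.mp hk with h | h
      · exact hall k h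
      · subst h; exact hbt
    · refine Or.inr ⟨m, hm, by omega, hnb, fun k h1 h2 => ?_⟩
      rcases Nat.lt_succ_iff_lt_or_eq.mp h2 with h | h
      · exact hblank k h1 h
      · subst h; exact hbt

theorem back_eq (lines : List String) : ∀ (i : Nat) (lnb : Option Nat), 1 ≤ i → INVd lines i lnb →
    aBack lines ((i : Int) - 1) = (match lnb with | none => (0 : Int) | some m => (m : Int)) := by
  intro i
  induction i with
  | zero => intro lnb h; omega
  | succ n ih =>
    intro lnb _ hinv
    by_cases hn : n = 0
    · subst hn
      rw [show ((0 + 1 : Nat) : Int) - 1 = (0 : Int) by norm_num]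
      rw [aBack, dif_neg (by simp)]
      rcases hinv with ⟨h1, _⟩ | ⟨m, hm, hmlt, _, _⟩
      · simp [h1]
      · have : m = 0 := by omega
        subst this
        simp [hm]
    · rw [show ((n + 1 : Nat) : Int) - 1 = ((n : Nat) : Int) by push_cast; ring]
      rcases hinv with ⟨h1, hall⟩ | ⟨m, hm, hmlt, hnb, hblank⟩
      · have hb : lineBlank (lines.getD n "") = true := hall n (by omega)
        rw [aBack, dif_pos ⟨by positivity, by simpa using hb⟩]
        have := ih lnb (by omega) (Or.inl ⟨h1, fun k hk => hall k (by omega)⟩)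
        simpa using this
      · by_cases hmn : m = n
        · subst hmn
          rw [aBack, dif_neg (by simp; intro _; simpa [hm] using hnb)]
          simp [hm]
        · have hb : lineBlank (lines.getD n "") = true := hblank n (by omega) (by omega)
          rw [aBack, dif_pos ⟨by positivity, by simpa using hb⟩]
          have := ih lnb (by omega)
            (Or.inr ⟨m, hm, by omega, hnb, fun k h1 h2 => hblank k h1 (by omega)⟩)
          simpa using this

theorem back_eq_none (lines : List String) (i : Nat) (h1 : 1 ≤ i) (hinv : INVd lines i none) :
    aBack lines ((i : Int) - 1) = 0 :=
  back_eq lines i none h1 hinv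

theorem back_eq_some (lines : List String) (i m : Nat) (h1 : 1 ≤ i) (hinv : INVd lines i (some m)) :
    aBack lines ((i : Int) - 1) = (m : Int) :=
  back_eq lines i (some m) h1 hinv

theorem aBack_neg_one (lines : List String) : aBack lines (-1) = -1 := by
  rw [aBack, dif_neg]
  exact fun hc => absurd hc.1 (by norm_num)

theorem getD_set_ne (lines : List String) (m i : Nat) (v : String) (hne : m ≠ i) :
    (lines.set m v).getD i "" = lines.getD i "" := by
  rw [List.getD_eq_getElem?_getD, List.getD_eq_getElem?_getD, List.getElem?_set_ne hne]

theorem pyGetD_last (lines : List String) (h : lines ≠ []) :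
    PySem.List.pyGetD lines (-1) "" = lines.getD (lines.length - 1) "" := by
  have hl : lines.length - 1 < lines.length := by
    have := List.length_pos_iff.mpr h
    omega
  rw [PySem.List.pyGetD_neg_one lines "" h, List.getLast_eq_getElem, List.getD_eq_getElem?_getD,
    List.getElem?_eq_getElem hl]
  rfl

-- SweepOK survives blanking an index j that is strictly before a non-blank index i
theorem sweepOK_set {cur : List String} {j i : Nat} (hj : j < i) (hi : i < cur.length)
    (hni : lineBlank (cur.getD i "") = false) (h : SweepOK cur) : SweepOK (cur.set j "") := by
  intro p hp hnb hall
  have hlen : (cur.set j "").length = cur.length := by simp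
  rw [hlen] at hp hall
  have hip : i ≤ p := by
    by_contra hc
    push_neg at hc
    have hb := hall i hc hi
    rw [getD_set_ne cur j i "" (by omega)] at hb
    rw [hni] at hb
    cases hb
  have hgp : (cur.set j "").getD p "" = cur.getD p "" := getD_set_ne cur j p "" (by omega)
  have hgl : (cur.set j "").getD (cur.length - 1) "" = cur.getD (cur.length - 1) "" :=
    getD_set_ne cur j (cur.length - 1) "" (by omega)
  rw [hgp]
  rw [hgp] at hnb
  have := h p hp hnb (fun k h1 h2 => by
    have := hall k h1 h2
    rwa [getD_set_ne cur j k "" (by omega)] at this)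
  rwa [hlen, hgl]

set_option maxHeartbeats 1600000 in
theorem main_eq : ∀ (n : Nat) (cur : List String) (i : Nat) (lnb : Option Nat),
    cur.length - i = n → INVd cur i lnb → SweepOK cur →
    (i = 0 → PySem.Str.isIn "\\endcodex" (cur.getD 0 "") = true →
      PySem.Str.isIn "\\endcode" (PySem.List.pyGetD cur (-1) "") = false) →
    aOuter cur i = bGo cur i lnb := by
  intro n
  induction n with
  | zero =>
    intro cur i lnb hn hinv _ _
    rw [aOuter_end (by omega), bGo_end (by omega)]
  | succ n ih =>
    intro cur i lnb hn hinv hsw hfirst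
    have hi : i < cur.length := by omega
    have hne : cur ≠ [] := by
      intro h; subst h; simp at hi
    by_cases hm : PySem.Str.isIn "\\endcodex" (PySem.List.pyGetD cur (i : Int) "") = true
    · -- marker at index i
      have hmg : PySem.Str.isIn "\\endcodex" (cur.getD i "") = true := by simpa using hm
      have hnbi : lineBlank (cur.getD i "") = false := marker_not_blank hmg
      rw [aOuter_step hi, aSkip_marker hm, bGo_step hi]
      simp only [hm, if_true]
      have hlnb' :
          (if lineBlank (PySem.List.pyGetD cur ((i : Nat) : Int) "") = false then some i else lnb) = some i := by
        rw [PySem.List.pyGetD_natCast, if_pos hnbi]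
      rw [hlnb']
      by_cases hi0 : i = 0
      · -- marker on the first line: A checks lines[-1], which has no \endcode here
        subst hi0
        have hlnb : lnb = none := by
          rcases hinv with ⟨h1, _⟩ | ⟨m, _, hmlt, _, _⟩
          · exact h1
          · omega
        subst hlnb
        simp only [Nat.cast_zero, zero_sub, aBack_neg_one]
        rw [if_neg (by rw [hfirst rfl hmg]; simp)]
        simp only [bErase]
        exact ih cur 1 (some 0) (by omega)
          (Or.inr ⟨0, rfl, by omega, hnbi, fun k h1 h2 => by omega⟩) hsw (by omega)
      · cases lnb with
        | none =>
          rcases hinv with ⟨_, hall⟩ | ⟨m, hm2, _, _, _⟩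
          · rw [back_eq_none cur i (by omega) (Or.inl ⟨rfl, hall⟩)]
            have h0b : lineBlank (cur.getD 0 "") = true := hall 0 (by omega)
            have h0 : PySem.Str.isIn "\\endcode" (PySem.List.pyGetD cur (0 : Int) "") = false := by
              rw [show (0 : Int) = ((0 : Nat) : Int) by norm_num, PySem.List.pyGetD_natCast]
              exact blank_no_endcode h0b
            rw [if_neg (by rw [h0]; simp)]
            simp only [bErase]
            exact ih cur (i + 1) (some i) (by omega)
              (Or.inr ⟨i, rfl, by omega, hnbi, fun k h1 h2 => by omega⟩) hsw (by omega)
          · cases hm2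
        | some p =>
          rcases hinv with ⟨h1, _⟩ | ⟨m, hm2, hmlt, hmnb, hbl⟩
          · cases h1
          · obtain rfl : p = m := Option.some.inj hm2
            rw [back_eq_some cur i p (by omega) (Or.inr ⟨p, hm2, hmlt, hmnb, hbl⟩)]
            simp only [bErase]
            by_cases hec : PySem.Str.isIn "\\endcode" (PySem.List.pyGetD cur ((p : Nat) : Int) "") = true
            · rw [if_pos hec]
              have hset : PySem.List.pySetD cur ((p : Nat) : Int) "" = cur.set p "" := by
                simp [PySem.List.pySetD_natCast]
              rw [hset]
              have hkeep : (cur.set p "").getD i "" = cur.getD i "" :=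
                getD_set_ne cur p i "" (by omega)
              refine ih (cur.set p "") (i + 1) (some i) (by simp; omega)
                (Or.inr ⟨i, rfl, by omega, by rw [hkeep]; exact hnbi, fun k h1 h2 => by omega⟩)
                (sweepOK_set hmlt hi hnbi hsw) (by omega)
            · rw [if_neg hec]
              exact ih cur (i + 1) (some i) (by omega)
                (Or.inr ⟨i, rfl, by omega, hnbi, fun k h1 h2 => by omega⟩) hsw (by omega)
    · -- no marker at index i
      have hm' : PySem.Str.isIn "\\endcodex" (PySem.List.pyGetD cur (i : Int) "") = false := by
        simpa using hm
      rw [bGo_step hi]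
      simp only [hm', if_false, Bool.false_eq_true]
      have hlift : (if lineBlank (PySem.List.pyGetD cur ((i : Nat) : Int) "") = false then some i else lnb)
          = (if lineBlank (cur.getD i "") = false then some i else lnb) := by
        rw [PySem.List.pyGetD_natCast]
      rw [hlift]
      have hinv' := INV_step hinv
      by_cases hi1 : i + 1 < cur.length
      · have hA : aOuter cur i = aOuter cur (i + 1) := by
          rw [aOuter_step hi, aOuter_step hi1, aSkip_step hi hm']
        rw [hA]
        exact ih cur (i + 1) _ (by omega) hinv' hsw (by omega)
      · -- i is the last index: A's skip loop runs off the end; SweepOK says its erase no-ops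
        rw [aOuter_step hi, aSkip_step hi hm', aSkip_len hi1]
        have hnomarker : PySem.Str.isIn "\\endcodex" (cur.getD (cur.length - 1) "") = false := by
          have h : cur.length - 1 = i := by omega
          rw [h]
          simpa using hm'
        by_cases hb : lineBlank (cur.getD i "") = false
        · rw [if_pos hb] at hinv' ⊢
          rw [back_eq_some cur (i + 1) i (by omega) hinv']
          have hr : PySem.Str.isIn "\\endcode" (PySem.List.pyGetD cur ((i : Nat) : Int) "") = false := by
            rw [PySem.List.pyGetD_natCast]
            rcases hsw i hi hb (fun k h1 h2 => by omega) with hl | hr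
            · rw [hl] at hnomarker; cases hnomarker
            · exact hr
          rw [if_neg (by rw [hr]; simp)]
          rw [aOuter_end (by omega), bGo_end (by omega)]
        · rw [if_neg hb] at hinv' ⊢
          cases lnb with
          | none =>
            rcases hinv' with ⟨_, hall⟩ | ⟨m, hm2, _, _, _⟩
            · rw [back_eq_none cur (i + 1) (by omega) (Or.inl ⟨rfl, hall⟩)]
              have h0b : lineBlank (cur.getD 0 "") = true := hall 0 (by omega)
              have h0 : PySem.Str.isIn "\\endcode" (PySem.List.pyGetD cur (0 : Int) "") = false := by
                rw [show (0 : Int) = ((0 : Nat) : Int) by norm_num, PySem.List.pyGetD_natCast]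
                exact blank_no_endcode h0b
              rw [if_neg (by rw [h0]; simp)]
              rw [aOuter_end (by omega), bGo_end (by omega)]
            · cases hm2
          | some m =>
            rcases hinv' with ⟨h1, _⟩ | ⟨m2, hm2, hmlt, hmnb, hblank⟩
            · cases h1
            · obtain rfl : m = m2 := Option.some.inj hm2
              rw [back_eq_some cur (i + 1) m (by omega) (Or.inr ⟨m, hm2, hmlt, hmnb, hblank⟩)]
              have hr : PySem.Str.isIn "\\endcode" (PySem.List.pyGetD cur ((m : Nat) : Int) "") = false := by
                rw [PySem.List.pyGetD_natCast]
                rcases hsw m (by omega) hmnb (fun k h1 h2 => hblank k h1 (by omega)) with hl | hr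
                · rw [hl] at hnomarker; cases hnomarker
                · exact hr
              rw [if_neg (by rw [hr]; simp)]
              rw [aOuter_end (by omega), bGo_end (by omega)]


theorem getLastD_eq (lines : List String) :
    lines.getLastD "" = lines.getD (lines.length - 1) "" := by
  rw [List.getLastD_eq_getLast?, List.getLast?_eq_getElem?, List.getD_eq_getElem?_getD]

theorem lastNB_eq {lines : List String} {p : Nat} (hp : p < lines.length)
    (hnb : lineBlank (lines.getD p "") = false)
    (hall : ∀ k, p < k → k < lines.length → lineBlank (lines.getD k "") = true) :
    (lines.reverse.dropWhile (fun s => lineBlank s)).headD "" = lines.getD p "" := by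
  have hsplit : lines.reverse = (lines.drop (p + 1)).reverse ++ (lines.take (p + 1)).reverse := by
    rw [← List.reverse_append, List.take_append_drop]
  have htake : (lines.take (p + 1)).reverse = lines.getD p "" :: (lines.take p).reverse := by
    rw [List.take_succ, List.getElem?_eq_getElem hp]
    simp [List.getD_eq_getElem?_getD, List.getElem?_eq_getElem hp]
  have hblanks : (lines.drop (p + 1)).reverse.dropWhile (fun s => lineBlank s) = [] := by
    rw [List.dropWhile_eq_nil_iff]
    intro s hs
    rw [List.mem_reverse] at hs
    obtain ⟨j, hj, rfl⟩ := List.mem_iff_getElem.mp hs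
    have hj' : p + 1 + j < lines.length := by
      have := hj
      simp only [List.length_drop] at this
      omega
    rw [List.getElem_drop]
    have := hall (p + 1 + j) (by omega) hj'
    rw [List.getD_eq_getElem?_getD, List.getElem?_eq_getElem hj'] at this
    simpa using this
  rw [hsplit, htake, List.dropWhile_append, hblanks]
  simp only [List.isEmpty_nil, if_true]
  rw [List.dropWhile_cons_of_neg (by simp only [hnb, Bool.false_eq_true, not_false_eq_true])]
  rfl

-- ===== VERDICT (by name: the statement is the Claim_ definition above) =====
theorem delete_code_example_spec : Claim_unchanged_delete_code_example := by
  intro lines _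
  unfold Spec_delete_code_example
  intro hnd
  by_cases hemp : lines = []
  · subst hemp
    show aOuter [] 0 = bGo [] 0 none
    rw [aOuter_end (by simp), bGo_end (by simp)]
  · have hsw : SweepOK lines := by
      intro p hp hnb hall
      by_cases hlast : PySem.Str.isIn "\\endcodex" (lines.getD (lines.length - 1) "") = true
      · exact Or.inl hlast
      · right
        by_contra hc
        have hec : PySem.Str.isIn "\\endcode" (lines.getD p "") = true := by
          cases hx : PySem.Str.isIn "\\endcode" (lines.getD p "") <;> simp_all
        refine hnd ⟨hemp, Or.inr ⟨?_, ?_⟩⟩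
        · rw [getLastD_eq]
          simpa using hlast
        · rw [lastNB_eq hp hnb hall]
          exact hec
    have hfirst : (0 : Nat) = 0 → PySem.Str.isIn "\\endcodex" (lines.getD 0 "") = true →
        PySem.Str.isIn "\\endcode" (PySem.List.pyGetD lines (-1) "") = false := by
      intro _ hm0
      rw [pyGetD_last lines hemp]
      by_contra hc
      have hec : PySem.Str.isIn "\\endcode" (lines.getD (lines.length - 1) "") = true := by
        cases hx : PySem.Str.isIn "\\endcode" (lines.getD (lines.length - 1) "") <;> simp_all
      refine hnd ⟨hemp, Or.inl ⟨hm0, ?_⟩⟩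
      rw [getLastD_eq]
      exact hec
    exact main_eq lines.length lines 0 none (by omega)
      (Or.inl ⟨rfl, fun k hk => (Nat.not_lt_zero k hk).elim⟩) hsw hfirst

theorem pvWitA : delete_code_example ["\\endcode"] = [""] := by
  show aOuter ["\\endcode"] 0 = [""]
  have hs : aSkip ["\\endcode"] 0 = 1 := by
    rw [aSkip_step (by simp) (by decide)]
    exact aSkip_len (by simp)
  rw [aOuter_step (by simp), hs]
  rw [show (((1 : Nat) : Int) - 1) = (0 : Int) by norm_num]
  have hb0 : aBack ["\\endcode"] 0 = 0 := by
    rw [aBack, dif_neg]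
    exact fun h => absurd h.1 (by norm_num)
  rw [hb0]
  rw [if_pos (show PySem.Str.isIn "\\endcode" (PySem.List.pyGetD ["\\endcode"] (0 : Int) "") = true by decide)]
  rw [show PySem.List.pySetD ["\\endcode"] (0 : Int) "" = [""] by decide]
  exact aOuter_end (by simp)

theorem pvWitB : delete_code_example_alt ["\\endcode"] = ["\\endcode"] := by
  show bGo ["\\endcode"] 0 none = ["\\endcode"]
  rw [bGo_step (by simp)]
  rw [if_neg (show ¬ PySem.Str.isIn "\\endcodex" (PySem.List.pyGetD ["\\endcode"] ((0 : Nat) : Int) "") = true by decide)]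
  exact bGo_end (by simp)

theorem delete_code_example_changed : Claim_changed_delete_code_example := by
  unfold Claim_changed_delete_code_example
  refine ⟨by decide, by decide, pvWitA, pvWitB, by decide⟩
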